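-- pv_equiv track=rewrite | github.com/Austin-T/python-vector-search | src/sorted_list_helper.py | add_to_list
-- ===== SOURCE A (Python) =====
-- def add_to_list(integer, sorted_list):
--     # inserts an integer into a sorted list in sorted order
--     # using a binary search. The document will not be inserted into the
--     # list if an identical document id already belongs to the list.
--     # parameters:
--     # - integer: an int
--     # - sorted_list: a sorted list of strings
--     # returns:
--     # - success: True if document_id was added, False otherwise
--
--     low = 0
--     high = len(sorted_list) - 1
--
--     while low <= high:
--         guess = (low + high) // 2
--         if sorted_list[guess] == integer:
--             return False
--         elif sorted_list[guess] < integer: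
--             low = guess + 1
--         else:
--             high = guess - 1
--
--     sorted_list.insert(low, integer)
--
--     return True
-- ===== SOURCE B (Python) =====
-- def add_to_list(integer, sorted_list):
--     # Linear scan: insert before the first strictly greater element,
--     # return False if an equal element is met first. Same in-place
--     # mutation and True/False contract as A on sorted input.
--     for i, x in enumerate(sorted_list):
--         if x == integer:
--             return False
--         if x > integer:
--             sorted_list.insert(i, integer)
--             return True
--     sorted_list.append(integer)
--     return True
-- ===== Notes on version B (the rewrite author's own statement) =====
-- stated objective: simpler
-- what changed: Replaces the binary search with a single linear scan that returns False on an equal element and inserts before the first strictly greater element (append if none); Pre_ excludes unsorted lists containing integer, where A's binary-search answer is accidental.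
-- outside the precondition, e.g. on add_to_list(3, [5, 3, 9]): A returns False, B returns True
import Mathlib
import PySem

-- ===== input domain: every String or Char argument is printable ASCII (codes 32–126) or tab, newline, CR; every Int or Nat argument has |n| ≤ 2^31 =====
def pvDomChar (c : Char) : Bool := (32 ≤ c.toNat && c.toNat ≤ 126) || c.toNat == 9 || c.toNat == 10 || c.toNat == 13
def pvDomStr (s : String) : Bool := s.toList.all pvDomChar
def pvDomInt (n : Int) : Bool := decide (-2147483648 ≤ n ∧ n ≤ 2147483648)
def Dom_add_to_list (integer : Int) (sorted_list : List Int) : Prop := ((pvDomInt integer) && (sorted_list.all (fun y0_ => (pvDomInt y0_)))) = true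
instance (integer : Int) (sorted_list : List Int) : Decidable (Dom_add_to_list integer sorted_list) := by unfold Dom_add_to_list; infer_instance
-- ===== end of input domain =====

-- B replaces A's binary search by a single linear scan (same True/False contract on
-- sorted input); both Pythons mutate sorted_list in place, the equivalence proved
-- here is about the RETURN value only (the mutations coincide on sorted input too,
-- but that is not stated here).


-- ===== PORT A =====
-- the while loop of A; the `none` branch is Python's IndexError, unreachable from
-- add_to_list's initial bounds (0 ≤ low ≤ guess ≤ high < len whenever the loop body runs)
def addLoopA (integer : Int) (xs : List Int) (low high : Int) : Bool :=
  if hlh : low ≤ high then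
    let guess := PySem.Int.floordiv (low + high) 2
    match PySem.List.pyGet? xs guess with
    | none => false
    | some v =>
      if v = integer then false
      else if v < integer then addLoopA integer xs (guess + 1) high
      else addLoopA integer xs low (guess - 1)
  else true
termination_by (high + 1 - low).toNat
decreasing_by
  · obtain ⟨h1, h2⟩ := PySem.Int.floordiv_two_mid_bounds hlh; omega
  · obtain ⟨h1, h2⟩ := PySem.Int.floordiv_two_mid_bounds hlh; omega

def add_to_list (integer : Int) (sorted_list : List Int) : Bool :=
  addLoopA integer sorted_list 0 ((sorted_list.length : Int) - 1)

-- ===== PORT B =====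
-- B's for-loop over the list: False on an equal element, True at the first strictly
-- greater element (insertion point) or at the end (append); the mutation itself does
-- not affect the returned Bool.
def scanB (integer : Int) : List Int → Bool
  | [] => true
  | x :: rest =>
    if x = integer then false
    else if integer < x then true
    else scanB integer rest

def add_to_list_alt (integer : Int) (sorted_list : List Int) : Bool :=
  scanB integer sorted_list

-- ===== PRECONDITION & SPEC =====
-- Pre_ excludes only UNSORTED lists that CONTAIN integer: there A's binary search
-- may accidentally miss the element it is supposed to find (the documented domain is
-- a sorted list), so whether False or True comes back is an artefact of the search
-- path and neither answer is specified. Sorted lists, and any list not containing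
-- integer, are all admitted.
def Pre_add_to_list (integer : Int) (sorted_list : List Int) : Prop :=
  sorted_list.Pairwise (· ≤ ·) ∨ integer ∉ sorted_list
instance (integer : Int) (sorted_list : List Int) : Decidable (Pre_add_to_list integer sorted_list) := by
  unfold Pre_add_to_list; infer_instance

def pvWitness_add_to_list : Int × List Int := (4, [1, 3, 7, 9])

def Spec_add_to_list (integer : Int) (sorted_list : List Int) (out : Bool) : Prop := out = add_to_list_alt integer sorted_list
instance (integer : Int) (sorted_list : List Int) (out : Bool) : Decidable (Spec_add_to_list integer sorted_list out) := by unfold Spec_add_to_list; infer_instance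

-- ===== CLAIM (what is proved, stated in full; the proofs are below) =====
def Claim_equal_add_to_list : Prop := ∀ (integer : Int) (sorted_list : List Int), Dom_add_to_list integer sorted_list → Pre_add_to_list integer sorted_list → Spec_add_to_list integer sorted_list (add_to_list integer sorted_list)

-- ===== LEMMAS AND PROOFS =====

-- If integer is absent, B's scan never returns False.
lemma scanB_not_mem (integer : Int) :
    ∀ xs : List Int, integer ∉ xs → scanB integer xs = true := by
  intro xs hn
  induction xs with
  | nil => simp [scanB]
  | cons x rest ih =>
    simp only [List.mem_cons, not_or] at hn
    have hne : ¬ x = integer := fun h => hn.1 h.symm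
    by_cases hlt : integer < x
    · simp [scanB, hne, hlt]
    · simp [scanB, hne, hlt, ih hn.2]

-- If integer is absent, A's loop never hits an equal element, so it returns True.
lemma loopA_not_mem (integer : Int) (xs : List Int) (hn : integer ∉ xs) :
    ∀ (n : Nat) (low high : Int), (high + 1 - low).toNat ≤ n →
      0 ≤ low → high < (xs.length : Int) →
      addLoopA integer xs low high = true := by
  intro n
  induction n with
  | zero =>
    intro low high hfuel hlow hhigh
    rw [addLoopA]
    simp only [show ¬ low ≤ high by omega, dif_neg, not_false_iff]
  | succ n ih =>
    intro low high hfuel hlow hhigh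
    rw [addLoopA]
    by_cases hle : low ≤ high
    · obtain ⟨hg1, hg2⟩ := PySem.Int.floordiv_two_mid_bounds hle
      set g := PySem.Int.floordiv (low + high) 2 with hgdef
      have hglt : g.toNat < xs.length := by omega
      have hget : PySem.List.pyGet? xs g = some xs[g.toNat] :=
        PySem.List.pyGet?_eq_some_getElem xs (by omega) (by omega)
      have hne : xs[g.toNat] ≠ integer := fun h => hn (h ▸ List.getElem_mem hglt)
      simp only [hle, dif_pos, hget, hne, if_false]
      by_cases hlt : xs[g.toNat] < integer
      · simp only [hlt, if_true]
        exact ih (g + 1) high (by omega) (by omega) hhigh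
      · simp only [hlt, if_false]
        exact ih low (g - 1) (by omega) hlow (by omega)
    · simp only [hle, dif_neg, not_false_iff]

-- On a sorted list, B's scan answers exactly "integer is absent".
lemma scanB_sorted (integer : Int) :
    ∀ xs : List Int, xs.Pairwise (· ≤ ·) → scanB integer xs = !(decide (integer ∈ xs)) := by
  intro xs hs
  induction xs with
  | nil => simp [scanB]
  | cons x rest ih =>
    rw [List.pairwise_cons] at hs
    obtain ⟨hx, hrest⟩ := hs
    by_cases hxe : x = integer
    · simp [scanB, hxe]
    · by_cases hlt : integer < x
      · have hnot : integer ∉ rest := by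
          intro hmem
          exact absurd (hx _ hmem) (by omega)
        simp [scanB, hxe, hlt, hnot, Ne.symm hxe]
      · simp [scanB, hxe, hlt, ih hrest, Ne.symm hxe]

-- A's loop, under the binary-search invariant, also answers "integer is absent".
lemma loopA_eq (integer : Int) (xs : List Int) (hs : xs.Pairwise (· ≤ ·)) :
    ∀ (n : Nat) (low high : Int), (high + 1 - low).toNat ≤ n →
      0 ≤ low → high < (xs.length : Int) →
      (∀ (i : Nat) (hi : i < xs.length), (i : Int) < low → xs[i] < integer) →
      (∀ (i : Nat) (hi : i < xs.length), high < (i : Int) → integer < xs[i]) →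
      addLoopA integer xs low high = !(decide (integer ∈ xs)) := by
  have hmono : ∀ (i j : Nat) (hi : i < xs.length) (hj : j < xs.length), i ≤ j → xs[i] ≤ xs[j] := by
    intro i j hi hj hij
    rcases Nat.lt_or_ge i j with h | h
    · exact List.pairwise_iff_getElem.mp hs i j hi hj h
    · have : i = j := by omega
      subst this; exact le_refl _
  intro n
  induction n with
  | zero =>
    intro low high hfuel hlow hhigh hL hR
    have hgt : ¬ low ≤ high := by omega
    rw [addLoopA]
    simp only [hgt, dif_neg, not_false_iff]
    have hnot : integer ∉ xs := by
      intro hmem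
      obtain ⟨i, hi, hxi⟩ := List.mem_iff_getElem.mp hmem
      rcases Int.lt_or_le (i : Int) low with h | h
      · exact absurd hxi.symm (by have := hL i hi h; omega)
      · exact absurd hxi.symm (by have := hR i hi (by omega); omega)
    simp [hnot]
  | succ n ih =>
    intro low high hfuel hlow hhigh hL hR
    rw [addLoopA]
    by_cases hle : low ≤ high
    · obtain ⟨hg1, hg2⟩ := PySem.Int.floordiv_two_mid_bounds hle
      set g := PySem.Int.floordiv (low + high) 2 with hgdef
      have hg0 : 0 ≤ g := by omega
      have hglen : g < (xs.length : Int) := by omega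
      have hglt : g.toNat < xs.length := by omega
      have hget : PySem.List.pyGet? xs g = some xs[g.toNat] :=
        PySem.List.pyGet?_eq_some_getElem xs hg0 hglen
      simp only [hle, dif_pos, hget]
      by_cases heq : xs[g.toNat] = integer
      · have hmem : integer ∈ xs := heq ▸ List.getElem_mem hglt
        simp [heq, hmem]
      · by_cases hlt : xs[g.toNat] < integer
        · simp only [heq, if_false, hlt, if_true]
          apply ih (g + 1) high (by omega) (by omega) hhigh
          · intro i hi hilt
            have : xs[i] ≤ xs[g.toNat] := hmono i g.toNat hi hglt (by omega)
            omega
          · exact hR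
        · simp only [heq, if_false, hlt]
          apply ih low (g - 1) (by omega) hlow (by omega) hL
          intro i hi hgt
          have : xs[g.toNat] ≤ xs[i] := hmono g.toNat i hglt hi (by omega)
          omega
    · simp only [hle, dif_neg, not_false_iff]
      have hnot : integer ∉ xs := by
        intro hmem
        obtain ⟨i, hi, hxi⟩ := List.mem_iff_getElem.mp hmem
        rcases Int.lt_or_le (i : Int) low with h | h
        · exact absurd hxi.symm (by have := hL i hi h; omega)
        · exact absurd hxi.symm (by have := hR i hi (by omega); omega)
      simp [hnot]

-- ===== VERDICT (by name: the statement is the Claim_ definition above) =====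
theorem add_to_list_spec : Claim_equal_add_to_list := by
  intro integer xs _ hpre
  unfold Spec_add_to_list add_to_list add_to_list_alt
  by_cases hmem : integer ∈ xs
  · have hs : xs.Pairwise (· ≤ ·) := hpre.resolve_right (fun h => h hmem)
    rw [scanB_sorted integer xs hs]
    exact loopA_eq integer xs hs ((xs.length : Int) - 1 + 1 - 0).toNat 0
      ((xs.length : Int) - 1) (le_refl _) (by omega) (by omega)
      (by intro i hi h; omega) (by intro i hi h; omega)
  · rw [scanB_not_mem integer xs hmem]
    exact loopA_not_mem integer xs hmem ((xs.length : Int) - 1 + 1 - 0).toNat 0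
      ((xs.length : Int) - 1) (le_refl _) (by omega) (by omega)
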